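-- pv_equiv track=rewrite | github.com/DRL/blobtools | bloblib/BtTax.py | getTreeList
-- ===== SOURCE A (Python) =====
-- def getTreeList(taxIds, nodesDB):
--     known_tree_lists = {}
--     for taxId in taxIds:
--         if not taxId in known_tree_lists:
--             tree_list = []
--             nextTaxId = [taxId]
--             while nextTaxId:
--                 thisTaxId = nextTaxId.pop(0)
--                 if (not thisTaxId == '1') and (thisTaxId in nodesDB):
--                     parent = nodesDB[thisTaxId]['parent']
--                     nextTaxId.append(parent)
--                     tree_list.append(thisTaxId)
--                 else:
--                     tree_list.append('1')
--             known_tree_lists[taxId] = tree_list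
--     return known_tree_lists
-- ===== SOURCE B (Python) =====
-- def getTreeList(taxIds, nodesDB):
--     cache = {}          # node -> its full ancestor chain (shared suffixes)
--     result = {}
--     for taxId in taxIds:
--         if taxId in result:
--             continue
--         path = []
--         k = taxId
--         while True:
--             if k == '1' or k not in nodesDB:
--                 tail = ['1']
--                 break
--             if k in cache:
--                 tail = cache[k]
--                 break
--             path.append(k)
--             k = nodesDB[k]['parent']
--         chain = tail
--         for node in reversed(path):
--             chain = [node] + chain
--             cache[node] = chain
--         result[taxId] = chain
--     return result
-- ===== Notes on version B (the rewrite author's own statement) =====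
-- stated objective: alternative
-- what changed: B memoizes the full ancestor chain of every node visited (not just per taxId), so a walk stops as soon as it reaches any previously-seen node and reuses the cached suffix, instead of A's full walk to the root for each distinct taxId.
import Mathlib
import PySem

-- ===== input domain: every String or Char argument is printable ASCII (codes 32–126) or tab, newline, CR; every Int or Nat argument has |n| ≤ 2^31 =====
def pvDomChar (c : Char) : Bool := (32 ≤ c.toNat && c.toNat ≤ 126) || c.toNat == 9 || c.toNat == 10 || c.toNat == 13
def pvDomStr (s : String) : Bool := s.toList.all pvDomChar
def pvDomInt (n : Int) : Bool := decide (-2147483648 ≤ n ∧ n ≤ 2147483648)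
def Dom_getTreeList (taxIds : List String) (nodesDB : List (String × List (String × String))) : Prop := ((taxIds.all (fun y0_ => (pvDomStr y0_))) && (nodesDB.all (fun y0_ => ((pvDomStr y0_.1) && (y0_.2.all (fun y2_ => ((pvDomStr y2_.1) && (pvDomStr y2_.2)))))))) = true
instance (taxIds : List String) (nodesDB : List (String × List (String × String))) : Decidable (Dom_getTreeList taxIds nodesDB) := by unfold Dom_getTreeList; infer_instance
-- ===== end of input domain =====

-- B memoizes every visited node's ancestor chain and reuses cached suffixes, replacing A's
-- full walk-to-root per distinct taxId (objective: alternative algorithm, fewer walk steps).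

-- shared helper: Python dict lookup on an association list (first-match, PySem.Dict semantics)
def pget {α : Type} (l : List (String × α)) (k : String) : Option α :=
  (PySem.Dict.mk l).get? k

-- ===== PORT A =====
-- inner while-loop of A; fuel only makes the recursion total (Python loops forever on a parent
-- cycle; such inputs are excluded by Pre_); on nodesDB[this]['parent'] KeyError (excluded) it stops
def aLoop (db : List (String × List (String × String))) :
    Nat → List String → List String → List String
  | fuel, next, acc =>
    match next with
    | [] => acc.reverse
    | this :: rest =>
      match fuel with
      | 0 => acc.reverse
      | n + 1 =>
        if this ≠ "1" ∧ (pget db this).isSome then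
          match (pget db this).bind (fun f => pget f "parent") with
          | some p => aLoop db n (rest ++ [p]) (this :: acc)
          | none => acc.reverse
        else aLoop db n rest ("1" :: acc)

def getTreeList (taxIds : List String) (nodesDB : List (String × List (String × String))) : List (String × List String) :=
  (taxIds.foldl (fun (known : PySem.Dict String (List String)) taxId =>
      if known.contains taxId then known
      else known.insert taxId (aLoop nodesDB (nodesDB.length + 1) [taxId] []))
    PySem.Dict.empty).items

-- ===== PORT B =====
-- B's while-loop: walk up collecting the fresh path until root/unknown node or a cached chain
def walkB (db : List (String × List (String × String))) :
    Nat → PySem.Dict String (List String) → List String → String →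
    List String × List String
  | 0, _, acc, _ => (acc.reverse, ["1"])
  | n + 1, cache, acc, k =>
    if k = "1" ∨ pget db k = none then (acc.reverse, ["1"])
    else
      match cache.get? k with
      | some t => (acc.reverse, t)
      | none =>
        match (pget db k).bind (fun f => pget f "parent") with
        | none => (acc.reverse, ["1"])
        | some p => walkB db n cache (k :: acc) p

-- B's reversed(path) loop: rebuild the chain back-to-front, caching every suffix
def storeB : PySem.Dict String (List String) → List String → List String →
    List String × PySem.Dict String (List String)
  | cache, [], tail => (tail, cache)
  | cache, node :: rest, tail =>
    let r := storeB cache rest tail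
    (node :: r.1, r.2.insert node (node :: r.1))

def getTreeList_alt (taxIds : List String) (nodesDB : List (String × List (String × String))) : List (String × List String) :=
  ((taxIds.foldl (fun (st : PySem.Dict String (List String) × PySem.Dict String (List String)) taxId =>
      if st.1.contains taxId then st
      else
        let w := walkB nodesDB (nodesDB.length + 1) st.2 [] taxId
        let s := storeB st.2 w.1 w.2
        (st.1.insert taxId s.1, s.2))
    (PySem.Dict.empty, PySem.Dict.empty)).1).items

-- ===== PRECONDITION & SPEC =====
-- one step of the parent walk: some none = terminal (root '1' or taxId not in nodesDB),
-- some (some p) = parent p, none = the node is present but has no 'parent' field (A raises KeyError)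
def statusOf (db : List (String × List (String × String))) (k : String) : Option (Option String) :=
  if k = "1" then some none
  else
    match pget db k with
    | none => some none
    | some fields =>
      match pget fields "parent" with
      | none => none
      | some p => some (some p)

def chase (db : List (String × List (String × String))) : Nat → String → Bool
  | 0, k => statusOf db k == some none
  | n + 1, k =>
    match statusOf db k with
    | some none => true
    | some (some p) => chase db n p
    | none => false

-- Pre_ excludes exactly the inputs on which A does not return: a queried lineage that hits a node
-- whose record lacks a 'parent' field (KeyError) or that cycles forever (|nodesDB| steps always
-- suffice for a terminating walk, so this is exact).
def Pre_getTreeList (taxIds : List String) (nodesDB : List (String × List (String × String))) : Prop :=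
  ∀ t ∈ taxIds, chase nodesDB nodesDB.length t = true
instance (taxIds : List String) (nodesDB : List (String × List (String × String))) : Decidable (Pre_getTreeList taxIds nodesDB) := by unfold Pre_getTreeList; infer_instance

def pvWitness_getTreeList : List String × (List (String × List (String × String))) :=
  (["9", "1", "9"], [("9", [("parent", "1")]), ("7", [("parent", "9")])])

def Spec_getTreeList (taxIds : List String) (nodesDB : List (String × List (String × String))) (out : List (String × List String)) : Prop := out = getTreeList_alt taxIds nodesDB
instance (taxIds : List String) (nodesDB : List (String × List (String × String))) (out : List (String × List String)) : Decidable (Spec_getTreeList taxIds nodesDB out) := by unfold Spec_getTreeList; infer_instance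

-- ===== CLAIM (what is proved, stated in full; the proofs are below) =====
def Claim_equal_getTreeList : Prop := ∀ (taxIds : List String) (nodesDB : List (String × List (String × String))), Dom_getTreeList taxIds nodesDB → Pre_getTreeList taxIds nodesDB → Spec_getTreeList taxIds nodesDB (getTreeList taxIds nodesDB)

-- ===== LEMMAS AND PROOFS =====

-- the ancestor chain of k, computed by fuel recursion on statusOf (proof-side specification)
def chainF (db : List (String × List (String × String))) : Nat → String → List String
  | 0, k => if statusOf db k = some none then ["1"] else [k]
  | n + 1, k =>
    match statusOf db k with
    | some none => ["1"]
    | some (some p) => k :: chainF db n p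
    | none => [k]

theorem chase_mono (db : List (String × List (String × String))) :
    ∀ n m k, chase db n k = true → n ≤ m → chase db m k = true := by
  intro n
  induction n with
  | zero =>
    intro m k h _
    cases m with
    | zero => exact h
    | succ m =>
      simp [chase] at h ⊢
      rw [h]
  | succ n ih =>
    intro m k h hnm
    cases m with
    | zero => omega
    | succ m =>
      simp [chase] at h ⊢
      cases hs : statusOf db k with
      | none => simp [hs] at h
      | some o =>
        cases o with
        | none => simp
        | some p =>
          simp [hs] at h
          exact ih m p h (by omega)

theorem chainF_stable (db : List (String × List (String × String))) :
    ∀ n m k, chase db n k = true → n ≤ m → chainF db m k = chainF db n k := by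
  intro n
  induction n with
  | zero =>
    intro m k h _
    simp [chase] at h
    cases m with
    | zero => rfl
    | succ m => simp [chainF, h]
  | succ n ih =>
    intro m k h hnm
    cases m with
    | zero => omega
    | succ m =>
      simp [chase] at h
      cases hs : statusOf db k with
      | none => simp [hs] at h
      | some o =>
        cases o with
        | none => simp [chainF, hs]
        | some p =>
          simp [hs] at h
          simp [chainF, hs, ih m p h (by omega)]

-- under chase n k, A's while-loop computes chainF n k
theorem aLoop_eq_chainF (db : List (String × List (String × String))) :
    ∀ n k acc, chase db n k = true →
      aLoop db (n + 1) [k] acc = acc.reverse ++ chainF db n k := by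
  intro n
  induction n with
  | zero =>
    intro k acc h
    simp [chase] at h
    simp [statusOf] at h
    by_cases hk : k = "1"
    · simp [aLoop, hk, chainF, statusOf]
    · have hg : pget db k = none := by
        by_contra hne
        cases hg' : pget db k with
        | none => exact hne hg'
        | some fields =>
          simp [hk, hg'] at h
          cases hp : pget fields "parent" with
          | none => simp [hp] at h
          | some p => simp [hp] at h
      simp [aLoop, hk, hg, chainF, statusOf]
  | succ n ih =>
    intro k acc h
    simp [chase] at h
    cases hs : statusOf db k with
    | none => simp [hs] at h
    | some o =>
      cases o with
      | none =>
        -- terminal: k = "1" or not in db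
        by_cases hk : k = "1"
        · subst hk; simp [aLoop, chainF, hs]
        · have hg : pget db k = none := by
            simp [statusOf, hk] at hs
            cases hg' : pget db k with
            | none => rfl
            | some fields =>
              simp [hg'] at hs
              cases hp : pget fields "parent" with
              | none => simp [hp] at hs
              | some p => simp [hp] at hs
          simp [aLoop, hk, hg, chainF, hs]
      | some p =>
        simp [hs] at h
        -- nonterminal: k ≠ "1", present, parent p
        have hk : k ≠ "1" := by
          intro hk; simp [statusOf, hk] at hs
        obtain ⟨fields, hg, hp⟩ : ∃ fields, pget db k = some fields ∧ pget fields "parent" = some p := by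
          simp [statusOf, hk] at hs
          cases hg' : pget db k with
          | none => simp [hg'] at hs
          | some fields =>
            simp [hg'] at hs
            cases hp' : pget fields "parent" with
            | none => simp [hp'] at hs
            | some q => simp [hp'] at hs; exact ⟨fields, rfl, by rw [hs] at hp'; exact hp'⟩
        have := ih p (k :: acc) h
        simp [aLoop, hk, hg, hp, chainF, hs, this]

-- the cache invariant of B: every cached chain is the true chain of a terminating node
def CacheInv (db : List (String × List (String × String)))
    (cache : PySem.Dict String (List String)) : Prop :=
  ∀ k v, cache.get? k = some v →
    chase db db.length k = true ∧ v = chainF db db.length k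

-- the collected path is a stack of correct chains over the tail
def SuffOK (db : List (String × List (String × String)))
    (path tail : List String) : Prop :=
  ∀ i (h : i < path.length),
    chase db db.length path[i] = true ∧ path.drop i ++ tail = chainF db db.length path[i]

theorem status_some_some_chase (db : List (String × List (String × String)))
    {n : Nat} {k p : String} (hs : statusOf db k = some (some p))
    (h : chase db n k = true) : n ≠ 0 ∧ chase db (n - 1) p = true := by
  cases n with
  | zero => simp [chase, hs] at h
  | succ n => simp [chase, hs] at h; exact ⟨by omega, by simpa using h⟩

theorem chainF_step (db : List (String × List (String × String)))
    {k p : String} (hs : statusOf db k = some (some p))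
    (h : chase db db.length k = true) :
    chainF db db.length k = k :: chainF db db.length p := by
  obtain ⟨hn, hp⟩ := status_some_some_chase db hs h
  cases hN : db.length with
  | zero => omega
  | succ m =>
    rw [hN] at hp h
    simp at hp
    simp [chainF, hs]
    exact (chainF_stable db m (m + 1) p hp (by omega)).symm

theorem walkB_correct (db : List (String × List (String × String))) :
    ∀ n k acc cache, CacheInv db cache → chase db n k = true →
      chase db db.length k = true →
      ∃ path,
        walkB db (n + 1) cache acc k = (acc.reverse ++ path, (walkB db (n + 1) cache acc k).2) ∧
        path ++ (walkB db (n + 1) cache acc k).2 = chainF db db.length k ∧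
        SuffOK db path (walkB db (n + 1) cache acc k).2 := by
  intro n
  induction n with
  | zero =>
    intro k acc cache hInv h hN
    simp [chase] at h
    have hcond : k = "1" ∨ pget db k = none := by
      by_cases hk : k = "1"
      · exact Or.inl hk
      · right
        simp [statusOf, hk] at h
        cases hg : pget db k with
        | none => rfl
        | some fields =>
          simp [hg] at h
          cases hp : pget fields "parent" with
          | none => simp [hp] at h
          | some p => simp [hp] at h
      -- terminal
    refine ⟨[], ?_, ?_, ?_⟩
    · simp [walkB, hcond]
    · have : chainF db db.length k = ["1"] := by
        rw [chainF_stable db 0 db.length k (by simp [chase, h]) (by omega)]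
        simp [chainF, h]
      simp [walkB, hcond, this]
    · intro i hi; simp at hi
  | succ n ih =>
    intro k acc cache hInv h hN
    simp [chase] at h
    cases hs : statusOf db k with
    | none => simp [hs] at h
    | some o =>
      cases o with
      | none =>
        have hcond : k = "1" ∨ pget db k = none := by
          by_cases hk : k = "1"
          · exact Or.inl hk
          · right
            simp [statusOf, hk] at hs
            cases hg : pget db k with
            | none => rfl
            | some fields =>
              simp [hg] at hs
              cases hp : pget fields "parent" with
              | none => simp [hp] at hs
              | some p => simp [hp] at hs
        refine ⟨[], ?_, ?_, ?_⟩
        · simp [walkB, hcond]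
        · have : chainF db db.length k = ["1"] := by
            rw [chainF_stable db 0 db.length k (by simp [chase, hs]) (by omega)]
            simp [chainF, hs]
          simp [walkB, hcond, this]
        · intro i hi; simp at hi
      | some p =>
        simp [hs] at h
        have hk : k ≠ "1" := by intro hk; simp [statusOf, hk] at hs
        obtain ⟨fields, hg, hp⟩ : ∃ fields, pget db k = some fields ∧ pget fields "parent" = some p := by
          simp [statusOf, hk] at hs
          cases hg' : pget db k with
          | none => simp [hg'] at hs
          | some fields =>
            simp [hg'] at hs
            cases hp' : pget fields "parent" with
            | none => simp [hp'] at hs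
            | some q => simp [hp'] at hs; exact ⟨fields, rfl, by rw [hs] at hp'; exact hp'⟩
        have hcond : ¬ (k = "1" ∨ pget db k = none) := by simp [hk, hg]
        cases hc : cache.get? k with
        | some t =>
          obtain ⟨hck, hct⟩ := hInv k t hc
          refine ⟨[], ?_, ?_, ?_⟩
          · simp [walkB, hcond, hc]
          · simp [walkB, hcond, hc, hct]
          · intro i hi; simp at hi
        | none =>
          have hNp : chase db db.length p = true := by
            obtain ⟨hn0, hp'⟩ := status_some_some_chase db hs hN
            exact chase_mono db (db.length - 1) db.length p hp' (by omega)
          obtain ⟨path', heq, hchain, hsuff⟩ := ih p (k :: acc) cache hInv h hNp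
          have hw : walkB db (n + 1 + 1) cache acc k = walkB db (n + 1) cache (k :: acc) p := by
            simp [walkB, hc, hg, hp, hk]
          refine ⟨k :: path', ?_, ?_, ?_⟩
          · rw [hw, heq]; simp
          · rw [hw, chainF_step db hs hN, ← hchain]; simp
          · intro i hi
            cases i with
            | zero =>
              refine ⟨hN, ?_⟩
              simp only [List.drop_zero, List.getElem_cons_zero]
              rw [hw, chainF_step db hs hN, ← hchain]; simp
            | succ j =>
              simp at hi
              have := hsuff j (by omega)
              rw [hw]
              simpa using this

theorem storeB_correct (db : List (String × List (String × String))) :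
    ∀ path tail cache, CacheInv db cache → SuffOK db path tail →
      (storeB cache path tail).1 = path ++ tail ∧ CacheInv db (storeB cache path tail).2 := by
  intro path
  induction path with
  | nil => intro tail cache hInv _; exact ⟨rfl, hInv⟩
  | cons node rest ih =>
    intro tail cache hInv hsuff
    have hrest : SuffOK db rest tail := by
      intro i hi
      have := hsuff (i + 1) (by simp; omega)
      simpa using this
    obtain ⟨h1, h2⟩ := ih tail cache hInv hrest
    have h0 := hsuff 0 (by simp)
    simp at h0
    constructor
    · simp [storeB, h1]
    · simp only [storeB]
      intro k v hv
      rw [h1] at hv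
      rw [PySem.Dict.get?_insert] at hv
      by_cases hk : k = node
      · subst hk
        simp at hv
        refine ⟨h0.1, ?_⟩
        subst hv
        exact h0.2
      · simp [hk] at hv
        exact h2 k v hv

-- the two folds stay in lockstep: A's dict equals B's result dict, B's cache stays invariant
theorem fold_eq (db : List (String × List (String × String))) :
    ∀ (ts : List String) (known : PySem.Dict String (List String))
      (cache : PySem.Dict String (List String)),
      CacheInv db cache → (∀ t ∈ ts, chase db db.length t = true) →
      ts.foldl (fun (known : PySem.Dict String (List String)) taxId =>
          if known.contains taxId then known
          else known.insert taxId (aLoop db (db.length + 1) [taxId] [])) known =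
      (ts.foldl (fun (st : PySem.Dict String (List String) × PySem.Dict String (List String)) taxId =>
          if st.1.contains taxId then st
          else
            let w := walkB db (db.length + 1) st.2 [] taxId
            let s := storeB st.2 w.1 w.2
            (st.1.insert taxId s.1, s.2)) (known, cache)).1 := by
  intro ts
  induction ts with
  | nil => intro known cache _ _; rfl
  | cons t ts ih =>
    intro known cache hInv hch
    have hct := hch t (by simp)
    have hts : ∀ u ∈ ts, chase db db.length u = true := fun u hu => hch u (by simp [hu])
    by_cases hk : known.contains t
    · simp only [List.foldl_cons, hk, if_true]
      exact ih known cache hInv hts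
    · obtain ⟨path, heq, hchain, hsuff⟩ :=
        walkB_correct db db.length t [] cache hInv hct hct
      obtain ⟨hs1, hs2⟩ := storeB_correct db path (walkB db (db.length + 1) cache [] t).2 cache hInv hsuff
      have hwpath : (walkB db (db.length + 1) cache [] t).1 = path := by
        rw [heq]; simp
      have hAval : aLoop db (db.length + 1) [t] [] = chainF db db.length t := by
        have := aLoop_eq_chainF db db.length t [] hct
        simpa using this
      have hBval : (storeB cache (walkB db (db.length + 1) cache [] t).1
          (walkB db (db.length + 1) cache [] t).2).1 = chainF db db.length t := by
        rw [hwpath, hs1, hchain]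
      have hBinv : CacheInv db (storeB cache (walkB db (db.length + 1) cache [] t).1
          (walkB db (db.length + 1) cache [] t).2).2 := by
        rw [hwpath]; exact hs2
      simp only [List.foldl_cons, hk, if_false, Bool.false_eq_true]
      rw [hAval]
      have := ih (known.insert t (chainF db db.length t)) _ hBinv hts
      rw [this, hBval]

-- ===== VERDICT (by name: the statement is the Claim_ definition above) =====
theorem getTreeList_spec : Claim_equal_getTreeList := by
  intro taxIds nodesDB _ hpre
  unfold Spec_getTreeList getTreeList getTreeList_alt
  exact congrArg PySem.Dict.items <| fold_eq nodesDB taxIds PySem.Dict.empty PySem.Dict.empty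
    (fun k v hv => by simp [PySem.Dict.get?_empty] at hv) hpre
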